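-- pv_equiv track=rewrite | github.com/Nicholas-Lucky/IMC-Prosperity-4-Submission | round_1/round_1_manual_trading.py | calculate_clearance_price
-- ===== SOURCE A (Python) =====
-- def calculate_clearance_price(bid_order_book, ask_order_book):
--     clearance_price = -1
--     max_volume = -1
--
--     for price_level in range(min(min(bid_order_book), min(ask_order_book)), max(max(bid_order_book), max(ask_order_book)) + 1):
--         buy_volume = get_expected_buy_volume(price_level, bid_order_book)
--         ask_volume = get_expected_ask_volume(price_level, ask_order_book)
--
--         # >= to CHOOSE THE HIGHER PRICE
--         if min(buy_volume, ask_volume) >= max_volume: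
--             max_volume = min(buy_volume, ask_volume)
--             clearance_price = price_level
--
--     return clearance_price
--
-- def get_expected_buy_volume(clearance_price, bid_order_book):
--     total_volume = 0
--
--     for price_level in bid_order_book:
--         if price_level >= clearance_price:
--             total_volume += bid_order_book[price_level]
--
--     return total_volume
--
-- def get_expected_ask_volume(clearance_price, ask_order_book):
--     total_volume = 0
--
--     for price_level in ask_order_book:
--         if price_level <= clearance_price:
--             total_volume += ask_order_book[price_level]
--
--     return total_volume
-- ===== SOURCE B (Python) =====
-- def calculate_clearance_price(bid_order_book, ask_order_book):
--     lo = min(min(bid_order_book), min(ask_order_book))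
--     hi = max(max(bid_order_book), max(ask_order_book))
--     buy_cum = sum(bid_order_book.values())   # volume of bids with price >= lo
--     ask_cum = 0                              # volume of asks with price <  lo
--     clearance_price = -1
--     max_volume = -1
--     for price_level in range(lo, hi + 1):
--         ask_cum += ask_order_book.get(price_level, 0)
--         volume = min(buy_cum, ask_cum)
--         if volume >= max_volume:
--             max_volume = volume
--             clearance_price = price_level
--         buy_cum -= bid_order_book.get(price_level, 0)
--     return clearance_price
-- ===== Notes on version B (the rewrite author's own statement) =====
-- stated objective: faster
-- what changed: Instead of recomputing the full buy/ask volumes from scratch at every price level, B does one ascending sweep that updates cumulative buy and ask volumes incrementally with O(1) work per price level.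
import Mathlib
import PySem

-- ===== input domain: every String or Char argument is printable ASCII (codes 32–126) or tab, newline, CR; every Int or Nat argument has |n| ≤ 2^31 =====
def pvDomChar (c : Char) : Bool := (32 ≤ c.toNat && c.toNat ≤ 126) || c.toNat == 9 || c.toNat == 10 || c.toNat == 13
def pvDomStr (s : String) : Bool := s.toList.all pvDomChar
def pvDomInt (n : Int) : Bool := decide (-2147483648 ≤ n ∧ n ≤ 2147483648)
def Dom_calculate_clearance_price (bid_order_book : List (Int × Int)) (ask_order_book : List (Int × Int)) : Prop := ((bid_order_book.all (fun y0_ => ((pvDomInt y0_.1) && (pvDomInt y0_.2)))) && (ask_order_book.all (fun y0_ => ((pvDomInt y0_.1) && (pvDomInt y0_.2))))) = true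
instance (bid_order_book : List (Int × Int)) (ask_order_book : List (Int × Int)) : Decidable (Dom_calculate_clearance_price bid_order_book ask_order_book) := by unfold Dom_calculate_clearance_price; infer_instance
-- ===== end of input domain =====

-- B replaces A's per-price-level full rescans of both books by one ascending sweep with
-- incrementally updated cumulative buy/ask volumes (objective: faster, asymptotic).

-- ===== PORT A =====
-- Python dict lookup book[k] on the association list
def pvDget (book : List (Int × Int)) (k : Int) : Int := (PySem.Dict.mk book).getD k 0

-- for price_level in bid_order_book: if price_level >= cp: total += bid_order_book[price_level]
def get_expected_buy_volume (clearance_price : Int) (bid_order_book : List (Int × Int)) : Int :=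
  (bid_order_book.map (·.1)).foldl
    (fun total_volume price_level =>
      if price_level ≥ clearance_price then total_volume + pvDget bid_order_book price_level
      else total_volume) 0

def get_expected_ask_volume (clearance_price : Int) (ask_order_book : List (Int × Int)) : Int :=
  (ask_order_book.map (·.1)).foldl
    (fun total_volume price_level =>
      if price_level ≤ clearance_price then total_volume + pvDget ask_order_book price_level
      else total_volume) 0

def calculate_clearance_price (bid_order_book : List (Int × Int)) (ask_order_book : List (Int × Int)) : Int :=
  match PySem.List.min? (bid_order_book.map (·.1)) (fun x => x),
        PySem.List.min? (ask_order_book.map (·.1)) (fun x => x),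
        PySem.List.max? (bid_order_book.map (·.1)) (fun x => x),
        PySem.List.max? (ask_order_book.map (·.1)) (fun x => x) with
  | some bmin, some amin, some bmax, some amax =>
      ((PySem.List.pyRange (min bmin amin) (max bmax amax + 1) 1).foldl
        (fun (st : Int × Int) price_level =>
          let buy_volume := get_expected_buy_volume price_level bid_order_book
          let ask_volume := get_expected_ask_volume price_level ask_order_book
          if min buy_volume ask_volume ≥ st.2 then (price_level, min buy_volume ask_volume) else st)
        (-1, -1)).1
  | _, _, _, _ => -1   -- Python raises ValueError on an empty book; excluded by Pre_

-- ===== PORT B =====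
-- Python dict .get(k, 0) on the association list (B's own helper)
def pvGet0 (book : List (Int × Int)) (k : Int) : Int := (PySem.Dict.mk book).getD k 0

def calculate_clearance_price_alt (bid_order_book : List (Int × Int)) (ask_order_book : List (Int × Int)) : Int :=
  if bid_order_book = [] ∨ ask_order_book = [] then -1  -- Python's min() raises ValueError here; excluded by Pre_
  else
    let lo := min ((PySem.List.min? (bid_order_book.map (·.1)) (fun x => x)).getD 0)
                  ((PySem.List.min? (ask_order_book.map (·.1)) (fun x => x)).getD 0)
    let hi := max ((PySem.List.max? (bid_order_book.map (·.1)) (fun x => x)).getD 0)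
                  ((PySem.List.max? (ask_order_book.map (·.1)) (fun x => x)).getD 0)
    ((PySem.List.pyRange lo (hi + 1) 1).foldl
      (fun (st : Int × Int × Int × Int) price_level =>
        let buy_cum := st.1
        let ask_cum := st.2.1 + pvGet0 ask_order_book price_level
        let volume := min buy_cum ask_cum
        let best := if volume ≥ st.2.2.2 then (price_level, volume) else st.2.2
        (buy_cum - pvGet0 bid_order_book price_level, ask_cum, best))
      ((bid_order_book.map (·.2)).sum, 0, -1, -1)).2.2.1

-- ===== PRECONDITION & SPEC =====
-- Pre_ excludes empty books, on which Python's min()/max() raise ValueError, and books with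
-- duplicate price keys, which do not denote a unique Python dict (the harness's dict construction
-- collapses duplicates last-value-wins while the assoc-list lookup is first-match).
def Pre_calculate_clearance_price (bid_order_book : List (Int × Int)) (ask_order_book : List (Int × Int)) : Prop :=
  bid_order_book ≠ [] ∧ ask_order_book ≠ [] ∧
  (bid_order_book.map (·.1)).Nodup ∧ (ask_order_book.map (·.1)).Nodup
instance (bid_order_book : List (Int × Int)) (ask_order_book : List (Int × Int)) : Decidable (Pre_calculate_clearance_price bid_order_book ask_order_book) := by unfold Pre_calculate_clearance_price; infer_instance

def pvWitness_calculate_clearance_price : (List (Int × Int)) × (List (Int × Int)) :=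
  ([(10, 5), (9, 3), (11, 2)], [(8, 4), (10, 6)])

def Spec_calculate_clearance_price (bid_order_book : List (Int × Int)) (ask_order_book : List (Int × Int)) (out : Int) : Prop := out = calculate_clearance_price_alt bid_order_book ask_order_book
instance (bid_order_book : List (Int × Int)) (ask_order_book : List (Int × Int)) (out : Int) : Decidable (Spec_calculate_clearance_price bid_order_book ask_order_book out) := by unfold Spec_calculate_clearance_price; infer_instance

-- ===== CLAIM (what is proved, stated in full; the proofs are below) =====
def Claim_equal_calculate_clearance_price : Prop := ∀ (bid_order_book : List (Int × Int)) (ask_order_book : List (Int × Int)), Dom_calculate_clearance_price bid_order_book ask_order_book → Pre_calculate_clearance_price bid_order_book ask_order_book → Spec_calculate_clearance_price bid_order_book ask_order_book (calculate_clearance_price bid_order_book ask_order_book)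

-- ===== LEMMAS AND PROOFS =====

-- foldl with guarded add = sum over filtered map
theorem pvFoldlIf (L : List Int) (g : Int → Int) (P : Int → Prop) [DecidablePred P] (acc : Int) :
    L.foldl (fun tv k => if P k then tv + g k else tv) acc
      = acc + ((L.filter (fun k => decide (P k))).map g).sum := by
  induction L generalizing acc with
  | nil => simp
  | cons x t ih =>
    simp only [List.foldl_cons, List.filter_cons]
    by_cases h : P x <;> simp [h, ih] <;> ring

theorem pvSumSplit (L : List Int) (g : Int → Int) (P Q R : Int → Prop)
    [DecidablePred P] [DecidablePred Q] [DecidablePred R]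
    (h : ∀ k, P k ↔ (Q k ∨ R k)) (hd : ∀ k, ¬(Q k ∧ R k)) :
    ((L.filter (fun k => decide (P k))).map g).sum
      = ((L.filter (fun k => decide (Q k))).map g).sum
        + ((L.filter (fun k => decide (R k))).map g).sum := by
  induction L with
  | nil => simp
  | cons x t ih =>
    simp only [List.filter_cons]
    by_cases hq : Q x <;> by_cases hr : R x
    · exact absurd ⟨hq, hr⟩ (hd x)
    · have hp : P x := (h x).mpr (Or.inl hq)
      simp [hp, hq, hr, ih]; ring
    · have hp : P x := (h x).mpr (Or.inr hr)
      simp [hp, hq, hr, ih]; ring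
    · have hp : ¬ P x := fun c => ((h x).mp c).elim hq hr
      simp [hp, hq, hr, ih]

theorem pvFilterEqNodup (L : List Int) (g : Int → Int) (p : Int) (h : L.Nodup) :
    ((L.filter (fun k => decide (k = p))).map g).sum = if p ∈ L then g p else 0 := by
  induction L with
  | nil => simp
  | cons x t ih =>
    simp only [List.nodup_cons] at h
    simp only [List.filter_cons, List.mem_cons]
    by_cases hx : x = p
    · subst hx
      have : t.filter (fun k => decide (k = x)) = [] := by
        apply List.filter_eq_nil_iff.mpr
        intro a ha
        simp only [decide_eq_true_eq]
        exact fun e => h.1 (e ▸ ha)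
      simp [this]
    · rw [if_neg (by simp [hx])]
      rw [ih h.2]
      have : ¬ (p = x) := fun e => hx e.symm
      simp [this]

theorem pvDgetNotMem (book : List (Int × Int)) (p : Int) (h : p ∉ book.map (·.1)) :
    pvDget book p = 0 := by
  apply PySem.Dict.getD_of_not_contains
  rw [PySem.Dict.contains_eq_decide_mem_keys]
  simpa [PySem.Dict.keys, PySem.Dict.items] using h

theorem pvBuySum (p : Int) (bid : List (Int × Int)) :
    get_expected_buy_volume p bid
      = (((bid.map (·.1)).filter (fun k => decide (p ≤ k))).map (pvDget bid)).sum := by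
  unfold get_expected_buy_volume
  rw [pvFoldlIf (bid.map (·.1)) (pvDget bid) (fun k => p ≤ k) 0]
  simp

theorem pvAskSum (p : Int) (ask : List (Int × Int)) :
    get_expected_ask_volume p ask
      = (((ask.map (·.1)).filter (fun k => decide (k ≤ p))).map (pvDget ask)).sum := by
  unfold get_expected_ask_volume
  rw [pvFoldlIf (ask.map (·.1)) (pvDget ask) (fun k => k ≤ p) 0]
  simp

theorem pvBuyStep (bid : List (Int × Int)) (h : (bid.map (·.1)).Nodup) (p : Int) :
    get_expected_buy_volume p bid = get_expected_buy_volume (p+1) bid + pvDget bid p := by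
  rw [pvBuySum, pvBuySum]
  rw [pvSumSplit (bid.map (·.1)) (pvDget bid) (fun k => p ≤ k) (fun k => k = p) (fun k => p+1 ≤ k)
        (by intro k; constructor <;> intro <;> omega) (by intro k; intro ⟨a, b⟩; omega)]
  rw [pvFilterEqNodup _ _ _ h]
  by_cases hm : p ∈ bid.map (·.1)
  · simp [hm]; ring
  · simp [hm, pvDgetNotMem bid p hm]

theorem pvAskStep (ask : List (Int × Int)) (h : (ask.map (·.1)).Nodup) (p : Int) :
    get_expected_ask_volume (p+1) ask = get_expected_ask_volume p ask + pvDget ask (p+1) := by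
  rw [pvAskSum, pvAskSum]
  rw [pvSumSplit (ask.map (·.1)) (pvDget ask) (fun k => k ≤ p+1) (fun k => k ≤ p) (fun k => k = p+1)
        (by intro k; constructor; · intro; omega
            · intro hc; cases hc <;> omega)
        (by intro k; intro ⟨a, b⟩; omega)]
  rw [pvFilterEqNodup _ _ _ h]
  by_cases hm : (p+1) ∈ ask.map (·.1)
  · simp [hm]
  · simp [hm, pvDgetNotMem ask (p+1) hm]

theorem pvValuesEq (bid : List (Int × Int)) (h : (bid.map (·.1)).Nodup) :
    (bid.map (·.1)).map (pvDget bid) = bid.map (·.2) := by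
  have hnd : (PySem.Dict.mk bid).keys.Nodup := by
    simpa [PySem.Dict.keys, PySem.Dict.items] using h
  have := PySem.Dict.values_eq_map_keys (PySem.Dict.mk bid) hnd 0
  simpa [PySem.Dict.keys, PySem.Dict.values, PySem.Dict.items, pvDget] using this.symm

theorem pvBuyInit (bid : List (Int × Int)) (h : (bid.map (·.1)).Nodup) (lo : Int)
    (hlo : ∀ k ∈ bid.map (·.1), lo ≤ k) :
    get_expected_buy_volume lo bid = (bid.map (·.2)).sum := by
  rw [pvBuySum]
  rw [List.filter_eq_self.mpr (by intro k hk; simpa using hlo k hk)]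
  rw [pvValuesEq bid h]

theorem pvAskInit (ask : List (Int × Int)) (h : (ask.map (·.1)).Nodup) (lo : Int)
    (hlo : ∀ k ∈ ask.map (·.1), lo ≤ k) :
    get_expected_ask_volume lo ask = pvDget ask lo := by
  rw [pvAskSum]
  rw [List.filter_congr (q := fun k => decide (k = lo))
        (by intro k hk; have := hlo k hk; simp; constructor <;> intro <;> omega)]
  rw [pvFilterEqNodup _ _ _ h]
  by_cases hm : lo ∈ ask.map (·.1)
  · simp [hm]
  · simp [hm, pvDgetNotMem ask lo hm]

theorem pvGet0_eq (book : List (Int × Int)) (k : Int) : pvGet0 book k = pvDget book k := rfl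

theorem pvSweep (bid ask : List (Int × Int))
    (hb : (bid.map (·.1)).Nodup) (ha : (ask.map (·.1)).Nodup) :
    ∀ (n : Nat) (b lo : Int), (b - lo).toNat = n → ∀ cp mv : Int,
    ((PySem.List.pyRange lo b 1).foldl
        (fun (st : Int × Int × Int × Int) price_level =>
          let buy_cum := st.1
          let ask_cum := st.2.1 + pvGet0 ask price_level
          let volume := min buy_cum ask_cum
          let best := if volume ≥ st.2.2.2 then (price_level, volume) else st.2.2
          (buy_cum - pvGet0 bid price_level, ask_cum, best))
        (get_expected_buy_volume lo bid,
         get_expected_ask_volume lo ask - pvGet0 ask lo, cp, mv)).2.2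
      = (PySem.List.pyRange lo b 1).foldl
          (fun (st : Int × Int) price_level =>
            let buy_volume := get_expected_buy_volume price_level bid
            let ask_volume := get_expected_ask_volume price_level ask
            if min buy_volume ask_volume ≥ st.2 then (price_level, min buy_volume ask_volume) else st)
          (cp, mv) := by
  intro n
  induction n with
  | zero =>
    intro b lo hn cp mv
    rw [PySem.List.pyRange_one_eq_nil (by omega)]
    rfl
  | succ n ih =>
    intro b lo hn cp mv
    rw [PySem.List.pyRange_one_cons (by omega)]
    simp only [List.foldl_cons]
    have e1 : get_expected_buy_volume lo bid - pvGet0 bid lo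
        = get_expected_buy_volume (lo+1) bid := by
      have := pvBuyStep bid hb lo; rw [pvGet0_eq]; omega
    have e2 : get_expected_ask_volume lo ask - pvGet0 ask lo + pvGet0 ask lo
        = get_expected_ask_volume lo ask := by ring
    have e3 : get_expected_ask_volume lo ask
        = get_expected_ask_volume (lo+1) ask - pvGet0 ask (lo+1) := by
      have := pvAskStep ask ha lo; rw [pvGet0_eq]; omega
    simp only [e2]
    rw [show (fun (st : Int × Int × Int × Int) price_level =>
          let buy_cum := st.1
          let ask_cum := st.2.1 + pvGet0 ask price_level
          let volume := min buy_cum ask_cum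
          let best := if volume ≥ st.2.2.2 then (price_level, volume) else st.2.2
          (buy_cum - pvGet0 bid price_level, ask_cum, best)) = (fun st price_level =>
          let buy_cum := st.1
          let ask_cum := st.2.1 + pvGet0 ask price_level
          let volume := min buy_cum ask_cum
          let best := if volume ≥ st.2.2.2 then (price_level, volume) else st.2.2
          (buy_cum - pvGet0 bid price_level, ask_cum, best)) from rfl]
    -- reduce the first step of each fold
    show ((PySem.List.pyRange (lo+1) b 1).foldl _
        (get_expected_buy_volume lo bid - pvGet0 bid lo,
         get_expected_ask_volume lo ask,
         if min (get_expected_buy_volume lo bid) (get_expected_ask_volume lo ask) ≥ mv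
           then (lo, min (get_expected_buy_volume lo bid) (get_expected_ask_volume lo ask))
           else (cp, mv))).2.2 = _
    rw [e1, e3]
    by_cases hc : min (get_expected_buy_volume lo bid)
        (get_expected_ask_volume (lo+1) ask - pvGet0 ask (lo+1)) ≥ mv
    · rw [if_pos hc]
      exact ih b (lo+1) (by omega) lo
        (min (get_expected_buy_volume lo bid) (get_expected_ask_volume (lo+1) ask - pvGet0 ask (lo+1)))
    · rw [if_neg hc]
      exact ih b (lo+1) (by omega) cp mv

-- ===== VERDICT (by name: the statement is the Claim_ definition above) =====
theorem calculate_clearance_price_spec : Claim_equal_calculate_clearance_price := by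
  intro bid ask _ hpre
  obtain ⟨hbne, hane, hb, ha⟩ := hpre
  unfold Spec_calculate_clearance_price
  have hbk : bid.map (·.1) ≠ [] := by simpa using hbne
  have hak : ask.map (·.1) ≠ [] := by simpa using hane
  cases hbm : PySem.List.min? (bid.map (·.1)) (fun x => x) with
  | none => exact absurd (((PySem.List.min?_eq_none_iff _ _).mp hbm)) hbk
  | some bmin =>
  cases ham : PySem.List.min? (ask.map (·.1)) (fun x => x) with
  | none => exact absurd (((PySem.List.min?_eq_none_iff _ _).mp ham)) hak
  | some amin =>
  cases hbM : PySem.List.max? (bid.map (·.1)) (fun x => x) with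
  | none => exact absurd (((PySem.List.max?_eq_none_iff _ _).mp hbM)) hbk
  | some bmax =>
  cases haM : PySem.List.max? (ask.map (·.1)) (fun x => x) with
  | none => exact absurd (((PySem.List.max?_eq_none_iff _ _).mp haM)) hak
  | some amax =>
  unfold calculate_clearance_price calculate_clearance_price_alt
  rw [hbm, ham, hbM, haM, if_neg (by simp [hbne, hane])]
  simp only [Option.getD_some]
  have hlob : ∀ k ∈ bid.map (·.1), min bmin amin ≤ k := fun k hk =>
    le_trans (min_le_left _ _) (PySem.List.min?_isMin hbm k hk)
  have hloa : ∀ k ∈ ask.map (·.1), min bmin amin ≤ k := fun k hk =>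
    le_trans (min_le_right _ _) (PySem.List.min?_isMin ham k hk)
  have h1 : (bid.map (·.2)).sum = get_expected_buy_volume (min bmin amin) bid :=
    (pvBuyInit bid hb (min bmin amin) hlob).symm
  have h2 : (0 : Int)
      = get_expected_ask_volume (min bmin amin) ask - pvGet0 ask (min bmin amin) := by
    rw [pvAskInit ask ha (min bmin amin) hloa, pvGet0_eq]; ring
  rw [h1, h2]
  exact congrArg Prod.fst (pvSweep bid ask hb ha
    ((max bmax amax + 1) - min bmin amin).toNat
    (max bmax amax + 1) (min bmin amin) rfl (-1) (-1)).symm
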